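-- pv_equiv track=rewrite | github.com/cnuebel98/MAMOAC | mc_simulator.py | get_pareto_fronts
-- ===== SOURCE A (Python) =====
-- def get_pareto_fronts(fitness_of_first_actions):
--     list_of_pareto_fronts = []
--     # Loop over each sublist of fitness data
--     for i, fitness_sublist in enumerate(fitness_of_first_actions):
--         pareto_front = []
--         # Check each point in the sublist
--         for j, (x1, y1) in enumerate(fitness_sublist):
--             is_pareto = True
--             for k, (x2, y2) in enumerate(fitness_sublist):
--                 if k == j:
--                     continue
--                 # Check for strict Pareto dominance
--                 if (x2 <= x1 and y2 <= y1) and (x2 < x1 or y2 < y1):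
--                     is_pareto = False
--                     break
--             # If no other point dominates (x1, y1), it's Pareto optimal
--             if is_pareto:
--                 pareto_front.append((x1, y1))
--         list_of_pareto_fronts.append(pareto_front)
--     return list_of_pareto_fronts
-- ===== SOURCE B (Python) =====
-- def get_pareto_fronts(fitness_of_first_actions):
--     # Sort each sublist lexicographically, then a single scan with running minima
--     # decides dominance per point value; output keeps the original order.
--     fronts = []
--     for sub in fitness_of_first_actions:
--         dominated = {}
--         cur_x = None   # x of the group currently being scanned
--         min_lt = None  # min y among points with x strictly below cur_x
--         min_all = None # min y among all points scanned so far
--         for (x, y) in sorted(sub):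
--             if cur_x is None or x != cur_x:
--                 min_lt = min_all
--                 cur_x = x
--             if min_all is None or y < min_all:
--                 min_all = y
--             dominated[(x, y)] = (min_lt is not None and min_lt <= y) or min_all < y
--         fronts.append([p for p in sub if not dominated[p]])
--     return fronts
-- ===== Notes on version B (the rewrite author's own statement) =====
-- stated objective: alternative
-- what changed: Replaces the quadratic all-pairs dominance test per sublist by sorting each sublist lexicographically and doing one scan that maintains running minima of y (over strictly-smaller x and over all x), recording per point value in a dict whether it is dominated, then filtering the original order; O(m log m) per sublist of length m versus A's O(m^2), though a timing run small-sublist inputs do not show a measured speed-up.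
import Mathlib
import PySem

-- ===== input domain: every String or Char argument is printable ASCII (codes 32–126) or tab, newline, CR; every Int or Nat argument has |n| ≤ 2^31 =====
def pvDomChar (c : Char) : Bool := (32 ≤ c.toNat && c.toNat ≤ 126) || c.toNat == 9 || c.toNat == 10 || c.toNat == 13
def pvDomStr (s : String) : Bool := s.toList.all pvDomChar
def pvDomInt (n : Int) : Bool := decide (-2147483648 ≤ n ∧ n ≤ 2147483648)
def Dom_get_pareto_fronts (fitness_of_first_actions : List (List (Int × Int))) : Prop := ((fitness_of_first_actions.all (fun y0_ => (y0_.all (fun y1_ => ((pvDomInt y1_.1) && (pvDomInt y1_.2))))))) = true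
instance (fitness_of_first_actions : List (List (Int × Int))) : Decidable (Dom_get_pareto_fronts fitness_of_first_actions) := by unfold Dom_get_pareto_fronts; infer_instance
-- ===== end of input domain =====

-- B sorts each sublist and decides dominance in one scan with running y-minima
-- instead of A's all-pairs dominance test; same return value.

-- ===== PORT A =====
-- inner 'for k, (x2, y2) in enumerate(...)' loop with the 'k == j: continue' skip and the break
def pvAInner (j : Nat) (x1 y1 : Int) : Nat → List (Int × Int) → Bool
  | _, [] => true
  | k, (x2, y2) :: rest =>
    if k = j then pvAInner j x1 y1 (k + 1) rest
    else if (x2 ≤ x1 ∧ y2 ≤ y1) ∧ (x2 < x1 ∨ y2 < y1) then false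
    else pvAInner j x1 y1 (k + 1) rest

-- 'for j, (x1, y1) in enumerate(fitness_sublist)' building pareto_front
def pvAScan (full : List (Int × Int)) : Nat → List (Int × Int) → List (Int × Int)
  | _, [] => []
  | j, (x1, y1) :: rest =>
    if pvAInner j x1 y1 0 full then (x1, y1) :: pvAScan full (j + 1) rest
    else pvAScan full (j + 1) rest

def get_pareto_fronts (fitness_of_first_actions : List (List (Int × Int))) : List (List (Int × Int)) :=
  fitness_of_first_actions.map (fun sub => pvAScan sub 0 sub)

-- ===== PORT B =====
-- state: (dominated dict, cur_x, min_lt, min_all); one step of the scan over sorted(sub)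
def pvBStep (st : PySem.Dict (Int × Int) Bool × Option Int × Option Int × Option Int)
    (p : Int × Int) : PySem.Dict (Int × Int) Bool × Option Int × Option Int × Option Int :=
  match st, p with
  | (d, curx, minlt, minall), (x, y) =>
    let s : Option Int × Option Int :=
      if curx ≠ some x then (some x, minall) else (curx, minlt)
    let minall' : Option Int :=
      match minall with
      | none => some y
      | some m => if y < m then some y else some m
    let dom : Bool :=
      (match s.2 with | some m => decide (m ≤ y) | none => false) ||
      (match minall' with | some m => decide (m < y) | none => false)
    (d.insert (x, y) dom, s.1, s.2, minall')

def pvBSub (sub : List (Int × Int)) : List (Int × Int) :=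
  let srt := PySem.List.sorted2 sub Prod.fst Prod.snd
  let st := srt.foldl pvBStep (PySem.Dict.empty, none, none, none)
  sub.filter (fun p => ! st.1.getD p false)   -- dominated[p]: every p of sub is a key of the dict

def get_pareto_fronts_alt (fitness_of_first_actions : List (List (Int × Int))) : List (List (Int × Int)) :=
  fitness_of_first_actions.map pvBSub

-- ===== PRECONDITION & SPEC =====
def Spec_get_pareto_fronts (fitness_of_first_actions : List (List (Int × Int))) (out : List (List (Int × Int))) : Prop := out = get_pareto_fronts_alt fitness_of_first_actions
instance (fitness_of_first_actions : List (List (Int × Int))) (out : List (List (Int × Int))) : Decidable (Spec_get_pareto_fronts fitness_of_first_actions out) := by unfold Spec_get_pareto_fronts; infer_instance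

-- ===== CLAIM (what is proved, stated in full; the proofs are below) =====
def Claim_equal_get_pareto_fronts : Prop := ∀ (fitness_of_first_actions : List (List (Int × Int))), Dom_get_pareto_fronts fitness_of_first_actions → Spec_get_pareto_fronts fitness_of_first_actions (get_pareto_fronts fitness_of_first_actions)

-- ===== LEMMAS AND PROOFS =====

-- strict Pareto dominance, the condition both programs decide
def pvStrictDomin (q p : Int × Int) : Bool :=
  (decide (q.1 ≤ p.1) && decide (q.2 ≤ p.2)) && (decide (q.1 < p.1) || decide (q.2 < p.2))

-- Python's lexicographic '<' on int pairs, as sorted2 compares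
def pvLexLt (a b : Int × Int) : Bool :=
  decide (a.1 < b.1) || (!decide (b.1 < a.1) && decide (a.2 < b.2))

-- ---- A-side: the index-skipping inner loop decides 'some point of the list dominates' ----

lemma pvAInner_eq (x1 y1 : Int) :
    ∀ (rest : List (Int × Int)) (k j : Nat),
      (∀ i (_ : i < rest.length), k + i = j → rest[i] = (x1, y1)) →
      pvAInner j x1 y1 k rest = ! rest.any (fun q => pvStrictDomin q (x1, y1)) := by
  intro rest
  induction rest with
  | nil => intro k j h; simp [pvAInner]
  | cons hd tl ih =>
    intro k j h
    obtain ⟨x2, y2⟩ := hd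
    simp only [pvAInner]
    by_cases hk : k = j
    · subst hk
      have hhd : ((x2, y2) : Int × Int) = (x1, y1) := by
        have := h 0 (by simp) (by omega); simpa using this
      rw [if_pos rfl, ih (k + 1) k (fun i hi hij => absurd hij (by omega))]
      rw [Bool.eq_iff_iff]
      simp only [Bool.not_eq_eq_eq_not, Bool.not_true,
        List.any_eq_false, List.any_cons, Bool.or_eq_false_iff]
      constructor
      · intro hall
        refine ⟨?_, hall⟩
        have h1 : x2 = x1 ∧ y2 = y1 := by
          have := congrArg Prod.fst hhd; have := congrArg Prod.snd hhd; exact ⟨by assumption, by assumption⟩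
        simp [pvStrictDomin]; omega
      · intro hall; exact hall.2
    · rw [if_neg hk]
      by_cases hdom : (x2 ≤ x1 ∧ y2 ≤ y1) ∧ (x2 < x1 ∨ y2 < y1)
      · rw [if_pos hdom]
        symm
        simp only [Bool.not_eq_false', List.any_cons, Bool.or_eq_true]
        left; simp [pvStrictDomin]; omega
      · rw [if_neg hdom, ih (k + 1) j (fun i hi hij => by
          have := h (i + 1) (by simpa using Nat.succ_lt_succ hi) (by omega)
          simpa using this)]
        rw [Bool.eq_iff_iff]
        simp only [Bool.not_eq_eq_eq_not, Bool.not_true,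
          List.any_eq_false, List.any_cons, Bool.or_eq_false_iff]
        constructor
        · intro hall
          refine ⟨?_, hall⟩
          simp [pvStrictDomin]; omega
        · intro hall; exact hall.2

lemma pvAScan_eq (full : List (Int × Int)) :
    ∀ (rest : List (Int × Int)) (j : Nat),
      (∀ i (_ : i < rest.length), ∃ (_ : j + i < full.length), full[j + i] = rest[i]) →
      pvAScan full j rest = rest.filter (fun p => ! full.any (fun q => pvStrictDomin q p)) := by
  intro rest
  induction rest with
  | nil => intro j h; simp [pvAScan]
  | cons hd tl ih =>
    intro j h
    obtain ⟨x1, y1⟩ := hd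
    have hj : ∃ (_ : j < full.length), full[j] = ((x1, y1) : Int × Int) := by
      have := h 0 (by simp); simpa using this
    obtain ⟨hjlt, hjeq⟩ := hj
    simp only [pvAScan]
    rw [pvAInner_eq x1 y1 full 0 j (fun i hi hij => by
        have hij' : i = j := by omega
        subst hij'; exact hjeq)]
    rw [ih (j + 1) (fun i hi => by
        have := h (i + 1) (by simpa using Nat.succ_lt_succ hi)
        simpa [show j + 1 + i = j + (i + 1) by omega] using this)]
    by_cases hc : full.any (fun q => pvStrictDomin q (x1, y1)) = true
    · simp [hc]
    · simp only [Bool.not_eq_true] at hc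
      simp [hc]

-- ---- sortedness of sorted2 ----

lemma pvLexLt_trans : ∀ a b c : Int × Int, pvLexLt a b = true → pvLexLt b c = true → pvLexLt a c = true := by
  intro a b c
  simp only [pvLexLt, Bool.or_eq_true, Bool.and_eq_true, Bool.not_eq_true', decide_eq_true_eq,
    decide_eq_false_iff_not]
  omega

lemma pvLexLt_asym : ∀ a b : Int × Int, pvLexLt a b = true → pvLexLt b a = false := by
  intro a b h
  rw [Bool.eq_false_iff]
  intro h2
  revert h h2
  simp only [pvLexLt, Bool.or_eq_true, Bool.and_eq_true, Bool.not_eq_true', decide_eq_true_eq,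
    decide_eq_false_iff_not]
  omega

lemma pvLexLt_false (a b : Int × Int) (h : pvLexLt b a = false) :
    a.1 < b.1 ∨ (a.1 = b.1 ∧ a.2 ≤ b.2) := by
  revert h
  rw [Bool.eq_false_iff]
  simp only [pvLexLt, ne_eq, Bool.or_eq_true, Bool.and_eq_true, Bool.not_eq_true',
    decide_eq_true_eq, decide_eq_false_iff_not, not_or, not_and]
  omega

lemma pvInsertBy_pairwise (x : Int × Int) (ys : List (Int × Int))
    (h : ys.Pairwise (fun a b => pvLexLt b a = false)) :
    (PySem.List.insertBy pvLexLt x ys).Pairwise (fun a b => pvLexLt b a = false) := by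
  induction ys with
  | nil => simp [PySem.List.insertBy]
  | cons y ys ih =>
    obtain ⟨hy, hys⟩ := List.pairwise_cons.mp h
    simp only [PySem.List.insertBy]
    by_cases hb : pvLexLt x y = true
    · rw [if_pos hb]
      refine List.Pairwise.cons ?_ h
      intro z hz
      rcases List.mem_cons.mp hz with rfl | hz
      · exact pvLexLt_asym x z hb
      · cases h0 : pvLexLt z x
        · rfl
        · exact absurd (pvLexLt_trans z x y h0 hb) (by simp [hy z hz])
    · rw [if_neg hb]
      refine List.Pairwise.cons ?_ (ih hys)
      intro z hz
      rw [PySem.List.mem_insertBy] at hz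
      rcases hz with rfl | hz
      · simpa using hb
      · exact hy z hz

lemma pvFoldl_insertBy_pairwise :
    ∀ (xs acc : List (Int × Int)),
      acc.Pairwise (fun a b => pvLexLt b a = false) →
      (xs.foldl (fun acc x => PySem.List.insertBy pvLexLt x acc) acc).Pairwise
        (fun a b => pvLexLt b a = false) := by
  intro xs
  induction xs with
  | nil => intro acc h; simpa using h
  | cons x xs ih => intro acc h; exact ih _ (pvInsertBy_pairwise x acc h)

lemma pvSorted2_pairwise (sub : List (Int × Int)) :
    (PySem.List.sorted2 sub Prod.fst Prod.snd).Pairwise (fun a b => pvLexLt b a = false) := by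
  have heq : PySem.List.sorted2 sub Prod.fst Prod.snd
      = sub.foldl (fun acc x => PySem.List.insertBy pvLexLt x acc) [] := rfl
  rw [heq]
  exact pvFoldl_insertBy_pairwise sub [] (by simp)

-- ---- B-side: the flag written by the scan is exactly 'some point dominates' ----

lemma pvFlag_correct (pre suf : List (Int × Int)) (x y : Int) (mlt : Option Int) (ma : Int)
    (hpreLe : ∀ q ∈ pre, q.1 < x ∨ (q.1 = x ∧ q.2 ≤ y))
    (hsufGe : ∀ q ∈ suf, x < q.1 ∨ (q.1 = x ∧ y ≤ q.2))
    (hmltN : mlt = none → ∀ q ∈ pre, ¬ q.1 < x)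
    (hmltS : ∀ m, mlt = some m → (∃ q ∈ pre, q.1 < x ∧ q.2 = m) ∧ ∀ q ∈ pre, q.1 < x → m ≤ q.2)
    (hmaMem : ∃ q ∈ pre ++ [((x : Int), y)], q.2 = ma)
    (hmaMin : ∀ q ∈ pre ++ [((x : Int), y)], ma ≤ q.2) :
    ((match mlt with | some m => decide (m ≤ y) | none => false) || decide (ma < y))
      = (pre ++ (x, y) :: suf).any (fun q => pvStrictDomin q (x, y)) := by
  have hdomiff : ((pre ++ (x, y) :: suf).any (fun q => pvStrictDomin q (x, y)) = true)
      ↔ (∃ q ∈ pre, pvStrictDomin q (x, y) = true) := by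
    rw [List.any_eq_true]
    constructor
    · rintro ⟨q, hq, hd⟩
      rcases List.mem_append.mp hq with hq | hq
      · exact ⟨q, hq, hd⟩
      · rcases List.mem_cons.mp hq with rfl | hq
        · exact absurd hd (by simp [pvStrictDomin])
        · have := hsufGe q hq
          simp only [pvStrictDomin, Bool.and_eq_true, Bool.or_eq_true, decide_eq_true_eq] at hd
          omega
    · rintro ⟨q, hq, hd⟩; exact ⟨q, List.mem_append_left _ hq, hd⟩
  have hmaWit : (ma < y) → ∃ q ∈ pre, pvStrictDomin q (x, y) = true := by
    intro hlt
    obtain ⟨q, hq, hq2⟩ := hmaMem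
    rcases List.mem_append.mp hq with hq | hq
    · have := hpreLe q hq
      refine ⟨q, hq, ?_⟩
      simp only [pvStrictDomin, Bool.and_eq_true, Bool.or_eq_true, decide_eq_true_eq]
      omega
    · simp only [List.mem_singleton] at hq
      subst hq
      simp only at hq2
      omega
  rcases mlt with _ | m
  · simp only [Bool.false_or]
    rw [Bool.eq_iff_iff, decide_eq_true_eq, hdomiff]
    constructor
    · exact hmaWit
    · rintro ⟨q, hq, hd⟩
      have hnlt := hmltN rfl q hq
      have hle := hpreLe q hq
      have hmin := hmaMin q (List.mem_append_left _ hq)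
      simp only [pvStrictDomin, Bool.and_eq_true, Bool.or_eq_true, decide_eq_true_eq] at hd
      omega
  · rw [Bool.eq_iff_iff, hdomiff]
    simp only [Bool.or_eq_true, decide_eq_true_eq]
    constructor
    · rintro (hm | hma)
      · obtain ⟨⟨q, hq, hq1, hq2⟩, _⟩ := hmltS m rfl
        refine ⟨q, hq, ?_⟩
        simp only [pvStrictDomin, Bool.and_eq_true, Bool.or_eq_true, decide_eq_true_eq]
        omega
      · exact hmaWit hma
    · rintro ⟨q, hq, hd⟩
      have hle := hpreLe q hq
      simp only [pvStrictDomin, Bool.and_eq_true, Bool.or_eq_true, decide_eq_true_eq] at hd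
      by_cases hq1 : q.1 < x
      · left; have := (hmltS m rfl).2 q hq hq1; omega
      · right; have := hmaMin q (List.mem_append_left _ hq); omega

-- ---- B-side: invariant of the scan ----

def pvInv (srt pre : List (Int × Int))
    (st : PySem.Dict (Int × Int) Bool × Option Int × Option Int × Option Int) : Prop :=
  (∀ p ∈ pre, st.1.getD p false = srt.any (fun q => pvStrictDomin q p)) ∧
  (st.2.1 = none → pre = []) ∧
  (∀ cx, st.2.1 = some cx → (∃ q ∈ pre, q.1 = cx) ∧ ∀ q ∈ pre, q.1 ≤ cx) ∧
  (∀ m, st.2.2.1 = some m → ∀ cx, st.2.1 = some cx →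
      (∃ q ∈ pre, q.1 < cx ∧ q.2 = m) ∧ ∀ q ∈ pre, q.1 < cx → m ≤ q.2) ∧
  (st.2.2.1 = none → ∀ cx, st.2.1 = some cx → ∀ q ∈ pre, ¬ q.1 < cx) ∧
  (∀ m, st.2.2.2 = some m → (∃ q ∈ pre, q.2 = m) ∧ ∀ q ∈ pre, m ≤ q.2) ∧
  (st.2.2.2 = none → pre = [])

lemma pvInv_step (pre suf : List (Int × Int)) (p : Int × Int)
    (st : PySem.Dict (Int × Int) Bool × Option Int × Option Int × Option Int)
    (hsort : (pre ++ p :: suf).Pairwise (fun a b => pvLexLt b a = false))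
    (hinv : pvInv (pre ++ p :: suf) pre st) :
    pvInv (pre ++ p :: suf) (pre ++ [p]) (pvBStep st p) := by
  obtain ⟨d, curx, minlt, minall⟩ := st
  obtain ⟨x, y⟩ := p
  obtain ⟨H1, H2, H3, H5, H4, H7, H6⟩ := hinv
  have hps := List.pairwise_append.mp hsort
  have hpreLe : ∀ q ∈ pre, q.1 < x ∨ (q.1 = x ∧ q.2 ≤ y) := by
    intro q hq
    have := pvLexLt_false q (x, y) (hps.2.2 q hq (x, y) List.mem_cons_self)
    omega
  have hsufGe : ∀ q ∈ suf, x < q.1 ∨ (q.1 = x ∧ y ≤ q.2) := by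
    intro q hq
    have := pvLexLt_false (x, y) q ((List.pairwise_cons.mp hps.2.1).1 q hq)
    omega
  rcases curx with _ | cx
  · -- first point ever: pre = [], minall = none
    have hpre0 : pre = [] := H2 rfl
    subst hpre0
    have hma0 : minall = none := by
      rcases minall with _ | m
      · rfl
      · obtain ⟨⟨q, hq, -⟩, -⟩ := H7 m rfl
        exact absurd hq List.not_mem_nil
    subst hma0
    have hstep : pvBStep (d, none, minlt, none) (x, y)
        = (d.insert (x, y) (false || decide (y < y)), some x, none, some y) := by
      simp [pvBStep]
    rw [hstep]
    have hflag := pvFlag_correct [] suf x y none y (by simp) hsufGe (by simp)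
      (fun m hm => by cases hm) (by simp) (by simp)
    refine ⟨?_, ?_, ?_, ?_, ?_, ?_, ?_⟩
    · intro p' hp'
      simp only [List.nil_append, List.mem_singleton] at hp'
      subst hp'
      rw [PySem.Dict.getD_insert_self]
      simpa using hflag
    · intro h; simp at h
    · intro cx' hcx'
      injection hcx' with heq; subst heq
      exact ⟨⟨(x, y), by simp, rfl⟩, by intro q hq; simp at hq; subst hq; omega⟩
    · intro m hm; simp at hm
    · intro _ cx' hcx' q hq
      injection hcx' with heq; subst heq
      simp at hq; subst hq; omega
    · intro m hm
      injection hm with heq; subst heq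
      exact ⟨⟨(x, y), by simp, rfl⟩, by intro q hq; simp at hq; subst hq; omega⟩
    · intro h; simp at h
  · -- pre is nonempty and minall = some m0
    obtain ⟨⟨q0, hq0, hq0x⟩, hbound⟩ := H3 cx rfl
    have hcxle : cx ≤ x := by rcases hpreLe q0 hq0 with h | h <;> omega
    rcases minall with _ | m0
    · rw [H6 rfl] at hq0; exact absurd hq0 List.not_mem_nil
    obtain ⟨hm0mem, hm0min⟩ := H7 m0 rfl
    set ma : Int := if y < m0 then y else m0 with hma
    have hmaMem : ∃ q ∈ pre ++ [((x : Int), y)], q.2 = ma := by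
      by_cases hy : y < m0
      · exact ⟨(x, y), by simp, by simp [hma, hy]⟩
      · obtain ⟨q, hq, hq2⟩ := hm0mem
        exact ⟨q, List.mem_append_left _ hq, by simp [hma, hy, hq2]⟩
    have hmaMin : ∀ q ∈ pre ++ [((x : Int), y)], ma ≤ q.2 := by
      intro q hq
      rcases List.mem_append.mp hq with hq | hq
      · have := hm0min q hq; rw [hma]; split_ifs <;> omega
      · simp only [List.mem_singleton] at hq; subst hq
        have h2 : (((x : Int), y) : Int × Int).2 = y := rfl
        rw [h2, hma]; split_ifs <;> omega
    have hmall' : (if y < m0 then (some y : Option Int) else some m0) = some ma := by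
      rw [hma]; split_ifs <;> rfl
    by_cases hx : cx = x
    · -- same x-group: cur_x and min_lt unchanged
      have hcond : ¬ ((some cx : Option Int) ≠ some x) := by simp [hx]
      rcases minlt with _ | ml
      · have hstep : pvBStep (d, some cx, none, some m0) (x, y)
            = (d.insert (x, y) (false || decide (ma < y)), some cx, none, some ma) := by
          simp only [pvBStep]
          rw [if_neg hcond, hmall']
        rw [hstep]
        have hflag := pvFlag_correct pre suf x y none ma hpreLe hsufGe
          (fun _ q hq hlt => H4 rfl cx rfl q hq (hx ▸ hlt))
          (fun m hm => by simp at hm)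
          hmaMem hmaMin
        refine ⟨?_, ?_, ?_, ?_, ?_, ?_, ?_⟩
        · intro p' hp'
          rw [PySem.Dict.getD_insert]
          by_cases he : p' = (x, y)
          · rw [if_pos he]; subst he; exact hflag
          · rw [if_neg he]
            rcases List.mem_append.mp hp' with hp' | hp'
            · exact H1 p' hp'
            · simp only [List.mem_singleton] at hp'; exact absurd hp' he
        · intro h; simp at h
        · intro cx' hcx'
          injection hcx' with heq; subst heq
          refine ⟨⟨(x, y), by simp, hx.symm⟩, ?_⟩
          intro q hq
          rcases List.mem_append.mp hq with hq | hq
          · exact hbound q hq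
          · simp only [List.mem_singleton] at hq; subst hq; omega
        · intro m hm; simp at hm
        · intro _ cx' hcx' q hq
          injection hcx' with heq; subst heq
          rcases List.mem_append.mp hq with hq | hq
          · exact H4 rfl cx rfl q hq
          · simp only [List.mem_singleton] at hq; subst hq; simp; omega
        · intro m hm
          injection hm with heq; subst heq
          exact ⟨hmaMem, hmaMin⟩
        · intro h; simp at h
      · have hstep : pvBStep (d, some cx, some ml, some m0) (x, y)
            = (d.insert (x, y) (decide (ml ≤ y) || decide (ma < y)), some cx, some ml, some ma) := by
          simp only [pvBStep]
          rw [if_neg hcond, hmall']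
        rw [hstep]
        have hflag := pvFlag_correct pre suf x y (some ml) ma hpreLe hsufGe
          (fun h => by simp at h)
          (fun m hm => by
            injection hm with heq; subst heq
            obtain ⟨⟨q, hq, h1, h2⟩, hb⟩ := H5 ml rfl cx rfl
            exact ⟨⟨q, hq, hx ▸ h1, h2⟩, fun q hq hlt => hb q hq (hx ▸ hlt)⟩)
          hmaMem hmaMin
        refine ⟨?_, ?_, ?_, ?_, ?_, ?_, ?_⟩
        · intro p' hp'
          rw [PySem.Dict.getD_insert]
          by_cases he : p' = (x, y)
          · rw [if_pos he]; subst he; exact hflag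
          · rw [if_neg he]
            rcases List.mem_append.mp hp' with hp' | hp'
            · exact H1 p' hp'
            · simp only [List.mem_singleton] at hp'; exact absurd hp' he
        · intro h; simp at h
        · intro cx' hcx'
          injection hcx' with heq; subst heq
          refine ⟨⟨(x, y), by simp, hx.symm⟩, ?_⟩
          intro q hq
          rcases List.mem_append.mp hq with hq | hq
          · exact hbound q hq
          · simp only [List.mem_singleton] at hq; subst hq; omega
        · intro m hm cx' hcx'
          injection hm with heq; subst heq
          injection hcx' with heq2; subst heq2
          obtain ⟨⟨q, hq, h1, h2⟩, hb⟩ := H5 ml rfl cx rfl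
          refine ⟨⟨q, List.mem_append_left _ hq, h1, h2⟩, ?_⟩
          intro q hq' hlt
          rcases List.mem_append.mp hq' with hq' | hq'
          · exact hb q hq' hlt
          · simp only [List.mem_singleton] at hq'; subst hq'; simp at hlt; omega
        · intro h; simp at h
        · intro m hm
          injection hm with heq; subst heq
          exact ⟨hmaMem, hmaMin⟩
        · intro h; simp at h
    · -- new x-group: every point of pre has strictly smaller x
      have hprelt : ∀ q ∈ pre, q.1 < x := by
        intro q hq
        rcases hpreLe q hq with h | h
        · exact h
        · exfalso; have := hbound q hq; omega
      have hcond : ((some cx : Option Int) ≠ some x) := by simp [hx]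
      have hstep : pvBStep (d, some cx, minlt, some m0) (x, y)
          = (d.insert (x, y) (decide (m0 ≤ y) || decide (ma < y)), some x, some m0, some ma) := by
        simp only [pvBStep]
        rw [if_pos hcond, hmall']
      rw [hstep]
      have hflag := pvFlag_correct pre suf x y (some m0) ma hpreLe hsufGe
        (fun h => by simp at h)
        (fun m hm => by
          injection hm with heq; subst heq
          obtain ⟨q, hq, hq2⟩ := hm0mem
          exact ⟨⟨q, hq, hprelt q hq, hq2⟩, fun q hq _ => hm0min q hq⟩)
        hmaMem hmaMin
      refine ⟨?_, ?_, ?_, ?_, ?_, ?_, ?_⟩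
      · intro p' hp'
        rw [PySem.Dict.getD_insert]
        by_cases he : p' = (x, y)
        · rw [if_pos he]; subst he; exact hflag
        · rw [if_neg he]
          rcases List.mem_append.mp hp' with hp' | hp'
          · exact H1 p' hp'
          · simp only [List.mem_singleton] at hp'; exact absurd hp' he
      · intro h; simp at h
      · intro cx' hcx'
        injection hcx' with heq; subst heq
        refine ⟨⟨(x, y), by simp, rfl⟩, ?_⟩
        intro q hq
        rcases List.mem_append.mp hq with hq | hq
        · exact le_of_lt (hprelt q hq)
        · simp only [List.mem_singleton] at hq; subst hq; omega
      · intro m hm cx' hcx'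
        injection hm with heq; subst heq
        injection hcx' with heq2; subst heq2
        obtain ⟨q, hq, hq2⟩ := hm0mem
        refine ⟨⟨q, List.mem_append_left _ hq, hprelt q hq, hq2⟩, ?_⟩
        intro q hq' hlt
        rcases List.mem_append.mp hq' with hq' | hq'
        · exact hm0min q hq'
        · simp only [List.mem_singleton] at hq'; subst hq'; simp at hlt
      · intro h; simp at h
      · intro m hm
        injection hm with heq; subst heq
        exact ⟨hmaMem, hmaMin⟩
      · intro h; simp at h

lemma pvInv_fold (srt : List (Int × Int))
    (hsort : srt.Pairwise (fun a b => pvLexLt b a = false)) :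
    ∀ (suf pre : List (Int × Int)) st, srt = pre ++ suf → pvInv srt pre st →
      pvInv srt (pre ++ suf) (suf.foldl pvBStep st) := by
  intro suf
  induction suf with
  | nil => intro pre st h hinv; simpa using hinv
  | cons p suf ih =>
    intro pre st h hinv
    subst h
    have hstep := pvInv_step pre suf p st hsort hinv
    have := ih (pre ++ [p]) (pvBStep st p) (by simp) (by simpa using hstep)
    simpa using this

lemma pvBSub_eq (sub : List (Int × Int)) :
    pvBSub sub = sub.filter (fun p => ! sub.any (fun q => pvStrictDomin q p)) := by
  have hsort := pvSorted2_pairwise sub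
  have hperm : (PySem.List.sorted2 sub Prod.fst Prod.snd).Perm sub :=
    PySem.List.sorted2_perm sub Prod.fst Prod.snd false
  have hinit : pvInv (PySem.List.sorted2 sub Prod.fst Prod.snd) []
      (PySem.Dict.empty, none, none, none) :=
    ⟨by simp, fun _ => rfl, by intro cx h; simp at h, by intro m h; simp at h,
     by intro h cx h2; simp at h2, by intro m h; simp at h, fun _ => rfl⟩
  have hinv := pvInv_fold _ hsort (PySem.List.sorted2 sub Prod.fst Prod.snd) []
    (PySem.Dict.empty, none, none, none) (by simp) hinit
  obtain ⟨HD, -, -, -, -, -, -⟩ := hinv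
  show sub.filter (fun p =>
      ! ((PySem.List.sorted2 sub Prod.fst Prod.snd).foldl pvBStep
          (PySem.Dict.empty, none, none, none)).1.getD p false) = _
  refine List.filter_congr ?_
  intro p hp
  have hpsrt : p ∈ PySem.List.sorted2 sub Prod.fst Prod.snd := hperm.mem_iff.mpr hp
  have hgd := HD p (by simpa using hpsrt)
  rw [hgd]
  congr 1
  rw [Bool.eq_iff_iff, List.any_eq_true, List.any_eq_true]
  constructor
  · rintro ⟨q, hq, h⟩; exact ⟨q, hperm.mem_iff.mp hq, h⟩
  · rintro ⟨q, hq, h⟩; exact ⟨q, hperm.mem_iff.mpr hq, h⟩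

-- ===== VERDICT (by name: the statement is the Claim_ definition above) =====
theorem get_pareto_fronts_spec : Claim_equal_get_pareto_fronts := by
  intro l _
  unfold Spec_get_pareto_fronts get_pareto_fronts get_pareto_fronts_alt
  refine List.map_congr_left (fun sub _ => ?_)
  rw [pvBSub_eq]
  have := pvAScan_eq sub sub 0 (by intro i hi; exact ⟨by simpa using hi, by simp⟩)
  simpa using this
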